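-- pv_equiv track=rewrite | github.com/reuben12358/CS206_Software_Testing | cs206-project-rm-main - Copy/testSuites.py | filenameTestcaseCoverage
-- ===== SOURCE A (Python) =====
-- def filenameTestcaseCoverage(lines):
--     filenameTestcaseCoverage = []
--     secondLine = False
--     coverage = ""
--     for line in lines:
--         if (secondLine == False):
--             fileName = line.partition(": ")[0]
--             testCase = line.partition(": ")[2]
--             testCase = testCase[:len(testCase) - 1]   # remove \n
--         elif (secondLine == True):
--             coverage = line.partition(" : ")[2]
--             coverage = coverage[:len(coverage) - 3]   # remove \n
--
--         if (secondLine == True):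
--             filenameTestcaseCoverage.append((fileName, testCase, coverage))
--
--         # set secondLine appropriately
--         if (secondLine == True):
--             secondLine = False
--         elif (secondLine == False):
--             secondLine = True
--
--     return filenameTestcaseCoverage
-- ===== SOURCE B (Python) =====
-- def _cov(line):
--     c = line.partition(" : ")[2]
--     return c[:len(c) - 3]
--
--
-- def filenameTestcaseCoverage(lines):
--     # staged passes: split the lines by index parity, map each column
--     # separately, then zip the three columns back together
--     firsts = [l for i, l in enumerate(lines) if i % 2 == 0]
--     seconds = [l for i, l in enumerate(lines) if i % 2 == 1]
--     names = [l.partition(": ")[0] for l in firsts]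
--     tests = [l.partition(": ")[2][:-1] for l in firsts]
--     covs = [_cov(l) for l in seconds]
--     return list(zip(names, tests, covs))
-- ===== Notes on version B (the rewrite author's own statement) =====
-- stated objective: alternative
-- what changed: Replaced A's single stateful pass (a boolean secondLine toggle carrying fileName/testCase/coverage across iterations) by staged passes: first split the lines into the even- and odd-indexed columns with enumerate-parity filters, then map each column independently to names/testcases/coverages, and finally zip the three columns into the result (zip's truncation drops an odd trailing line exactly as A's toggle leaves it un-appended).
import Mathlib
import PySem

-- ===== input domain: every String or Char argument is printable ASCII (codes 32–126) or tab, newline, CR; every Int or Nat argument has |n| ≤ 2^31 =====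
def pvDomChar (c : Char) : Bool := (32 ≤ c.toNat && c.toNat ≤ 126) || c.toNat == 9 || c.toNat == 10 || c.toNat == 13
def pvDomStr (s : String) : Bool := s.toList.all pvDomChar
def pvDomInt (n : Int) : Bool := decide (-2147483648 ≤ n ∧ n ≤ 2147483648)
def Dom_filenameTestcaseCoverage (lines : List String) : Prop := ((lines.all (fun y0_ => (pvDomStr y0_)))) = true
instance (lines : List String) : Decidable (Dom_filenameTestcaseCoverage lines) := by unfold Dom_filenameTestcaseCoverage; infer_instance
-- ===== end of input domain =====

-- B replaces A's single stateful pass (boolean secondLine toggle carrying values across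
-- iterations) by staged passes: parity-split the lines into two columns, map each column
-- independently, then zip the columns; same return value, objective: alternative.

-- Shared hand port of Python's str.partition(sep) for nonempty sep (exact: splits at the
-- FIRST occurrence of sep; if sep does not occur, returns (s, "", "")).
def pyPart3 (sep : List Char) : List Char → Option (List Char × List Char)
  | [] => if sep.isPrefixOf ([] : List Char) then some ([], []) else none
  | c :: rest =>
    if sep.isPrefixOf (c :: rest) then some ([], (c :: rest).drop sep.length)
    else
      match pyPart3 sep rest with
      | some (b, a) => some (c :: b, a)
      | none => none

def pyPartition (s sep : String) : String × String × String :=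
  match pyPart3 sep.toList s.toList with
  | some (b, a) => (String.ofList b, sep, String.ofList a)
  | none => (s, "", "")

-- ===== PORT A =====
-- A's loop body: state = (result list, secondLine flag, fileName, testCase, coverage)
def stepA (st : List (String × String × String) × Bool × String × String × String)
    (line : String) : List (String × String × String) × Bool × String × String × String :=
  match st with
  | (acc, secondLine, fileName, testCase, coverage) =>
    let (fileName, testCase, coverage) :=
      if secondLine = false then
        let fileName := (pyPartition line ": ").1
        let testCase := (pyPartition line ": ").2.2
        (fileName, PySem.Str.slice testCase none (some (PySem.Str.len testCase - 1)), coverage)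
      else
        let coverage := (pyPartition line " : ").2.2
        (fileName, testCase, PySem.Str.slice coverage none (some (PySem.Str.len coverage - 3)))
    let acc := if secondLine = true then acc ++ [(fileName, testCase, coverage)] else acc
    let secondLine := if secondLine = true then false else true
    (acc, secondLine, fileName, testCase, coverage)

def filenameTestcaseCoverage (lines : List String) : List (String × String × String) :=
  (lines.foldl stepA ([], false, "", "", "")).1

-- ===== PORT B =====
def pvCov (line : String) : String :=
  let c := (pyPartition line " : ").2.2
  PySem.Str.slice c none (some (PySem.Str.len c - 3))

-- zip(names, tests, covs) is ported as names.zip (tests.zip covs): the triple type is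
-- right-nested, and zip truncates to the shortest list exactly as Python's zip does.
def filenameTestcaseCoverage_alt (lines : List String) : List (String × String × String) :=
  let firsts := ((PySem.List.enumerate lines 0).filter (fun p => PySem.Int.mod p.1 2 == 0)).map Prod.snd
  let seconds := ((PySem.List.enumerate lines 0).filter (fun p => PySem.Int.mod p.1 2 == 1)).map Prod.snd
  let names := firsts.map (fun l => (pyPartition l ": ").1)
  let tests := firsts.map (fun l => PySem.Str.slice (pyPartition l ": ").2.2 none (some (-1)))
  let covs := seconds.map pvCov
  names.zip (tests.zip covs)

-- ===== PRECONDITION & SPEC =====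
def Spec_filenameTestcaseCoverage (lines : List String) (out : List (String × String × String)) : Prop := out = filenameTestcaseCoverage_alt lines
instance (lines : List String) (out : List (String × String × String)) : Decidable (Spec_filenameTestcaseCoverage lines out) := by unfold Spec_filenameTestcaseCoverage; infer_instance

-- ===== CLAIM (what is proved, stated in full; the proofs are below) =====
def Claim_equal_filenameTestcaseCoverage : Prop := ∀ (lines : List String), Dom_filenameTestcaseCoverage lines → Spec_filenameTestcaseCoverage lines (filenameTestcaseCoverage lines)

-- ===== LEMMAS AND PROOFS =====

-- proof-only helper: the common pairwise characterisation both programs reduce to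
def pairEntry (first second : String) : String × String × String :=
  ((pyPartition first ": ").1,
   PySem.Str.slice (pyPartition first ": ").2.2 none (some (-1)),
   pvCov second)

def pairRec : List String → List (String × String × String)
  | first :: second :: rest => pairEntry first second :: pairRec rest
  | _ => []

-- s[:len(s)-1] = s[:-1] (both drop the last character; on "" both are "").
theorem slice_len_sub_one (s : String) :
    PySem.Str.slice s none (some ((s.length : Int) - 1)) = PySem.Str.slice s none (some (-1)) := by
  have hl : s.length = s.toList.length := by simp
  simp only [PySem.Str.slice, PySem.Chars.slice_eq_listSlice, hl]
  cases h : s.toList with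
  | nil => simp
  | cons c t =>
    congr 1
    rw [PySem.List.slice_to_neg_one]
    have h2 : ((c :: t).length : Int) - 1 = ((t.length : Nat) : Int) := by simp
    rw [h2, PySem.List.slice_to_natCast, List.dropLast_eq_take]
    simp

-- A's fold equals the pairwise characterisation
theorem foldA_eq (lines : List String) :
    ∀ (acc : List (String × String × String)) (fn tc cov : String),
      (List.foldl stepA (acc, false, fn, tc, cov) lines).1
        = acc ++ pairRec lines := by
  induction lines using pairRec.induct with
  | case1 a b rest ih =>
    intro acc fn tc cov
    simp only [List.foldl, stepA]
    simp only [Bool.false_eq_true, if_false, if_true]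
    rw [ih]
    simp [pairEntry, pvCov, slice_len_sub_one, pairRec]
  | case2 x h =>
    intro acc fn tc cov
    match x with
    | [] => simp [pairRec]
    | [a] =>
      simp only [List.foldl, stepA, pairRec]
      simp
    | a :: b :: r => exact absurd rfl (h a b r)

-- shifting the enumerate start by 2 does not change a parity filter
theorem parity_shift2 (l : List String) (b : Int) :
    ∀ (s : Int),
      ((PySem.List.enumerate l (s + 2)).filter (fun p => PySem.Int.mod p.1 2 == b)).map Prod.snd
        = ((PySem.List.enumerate l s).filter (fun p => PySem.Int.mod p.1 2 == b)).map Prod.snd := by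
  induction l with
  | nil => intro s; simp [PySem.List.enumerate_nil]
  | cons x t ih =>
    intro s
    rw [PySem.List.enumerate_cons, PySem.List.enumerate_cons]
    have hm : PySem.Int.mod (s + 2) 2 = PySem.Int.mod s 2 := by
      rw [PySem.Int.mod_eq_emod_of_pos (by norm_num : (0:Int) < 2),
          PySem.Int.mod_eq_emod_of_pos (by norm_num : (0:Int) < 2)]
      omega
    have h2 : s + 2 + 1 = s + 1 + 2 := by ring
    simp only [List.filter_cons, hm, h2]
    split_ifs
    · simp only [List.map_cons]; rw [ih (s + 1)]
    · exact ih (s + 1)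

-- B's staged passes equal the pairwise characterisation
theorem alt_eq_pairRec (lines : List String) :
    filenameTestcaseCoverage_alt lines = pairRec lines := by
  induction lines using pairRec.induct with
  | case1 a b rest ih =>
    simp only [filenameTestcaseCoverage_alt] at ih ⊢
    rw [PySem.List.enumerate_cons, PySem.List.enumerate_cons]
    have h2 : (0 : Int) + 1 + 1 = 0 + 2 := by ring
    rw [h2]
    simp only [List.filter_cons,
      show (PySem.Int.mod 0 2 == (0:Int)) = true from by decide,
      show (PySem.Int.mod (0+1) 2 == (0:Int)) = false from by decide,
      show (PySem.Int.mod 0 2 == (1:Int)) = false from by decide,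
      show (PySem.Int.mod (0+1) 2 == (1:Int)) = true from by decide,
      show ((false : Bool) = true) = False from by simp,
      if_true, if_false, List.map_cons]
    rw [parity_shift2 rest 0 0, parity_shift2 rest 1 0]
    simp only [List.zip_cons_cons]
    rw [ih]
    rfl
  | case2 x h =>
    match x with
    | [] => simp [filenameTestcaseCoverage_alt, pairRec, PySem.List.enumerate_nil]
    | [a] =>
      simp only [filenameTestcaseCoverage_alt, pairRec]
      rw [PySem.List.enumerate_cons, PySem.List.enumerate_nil]
      simp only [List.filter_cons,
        show (PySem.Int.mod 0 2 == (0:Int)) = true from by decide,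
        show (PySem.Int.mod 0 2 == (1:Int)) = false from by decide,
        show ((false : Bool) = true) = False from by simp,
        if_true, if_false, List.filter_nil, List.map_cons, List.map_nil, List.zip_nil_right]
    | a :: b :: r => exact absurd rfl (h a b r)

-- ===== VERDICT (by name: the statement is the Claim_ definition above) =====
theorem filenameTestcaseCoverage_spec : Claim_equal_filenameTestcaseCoverage := by
  intro lines _
  show filenameTestcaseCoverage lines = filenameTestcaseCoverage_alt lines
  rw [alt_eq_pairRec]
  simpa [filenameTestcaseCoverage] using foldA_eq lines [] "" "" ""
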